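-- pv_equiv track=rewrite | github.com/RafaGomes1/IA | src/Sistema.py | dividir_lista
-- ===== SOURCE A (Python) =====
-- def dividir_lista(lista, freg):
--     resultado = []
--     sublista = []
--
--     for elemento in lista:
--         if elemento == freg:
--             if sublista:
--                 sublista.append(elemento)
--                 resultado.append(sublista)
--                 sublista = []
--                 sublista.append(elemento)
--             else:
--                 sublista.append(elemento)
--         else:
--             sublista.append(elemento)
--
--     if sublista:
--      resultado.append(sublista)
--
--     return resultado
-- ===== SOURCE B (Python) =====
-- def dividir_lista(lista, freg):
--     lista = list(lista)
--     cuts = [i for i, e in enumerate(lista) if e == freg and i > 0]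
--     res = []
--     start = 0
--     for i in cuts:
--         res.append(lista[start:i + 1])
--         start = i
--     tail = lista[start:]
--     if tail:
--         res.append(tail)
--     return res
-- ===== Notes on version B (the rewrite author's own statement) =====
-- stated objective: alternative
-- what changed: B replaces A's single stateful accumulator loop by first computing the cut indices (positions >0 holding the delimiter) in one enumerate pass and then emitting the result as overlapping slices lista[start:i+1] between consecutive cuts plus the tail slice.
import Mathlib
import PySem

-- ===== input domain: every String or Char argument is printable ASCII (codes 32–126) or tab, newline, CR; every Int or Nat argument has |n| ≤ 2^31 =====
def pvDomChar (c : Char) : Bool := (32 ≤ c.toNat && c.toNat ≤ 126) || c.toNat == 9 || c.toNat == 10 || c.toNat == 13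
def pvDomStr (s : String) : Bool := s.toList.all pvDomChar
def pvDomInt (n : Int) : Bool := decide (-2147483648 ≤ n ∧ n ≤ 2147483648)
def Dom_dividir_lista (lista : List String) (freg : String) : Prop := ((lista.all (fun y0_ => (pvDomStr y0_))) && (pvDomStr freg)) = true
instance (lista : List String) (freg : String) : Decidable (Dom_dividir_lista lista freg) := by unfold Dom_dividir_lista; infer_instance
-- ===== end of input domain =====

-- B changes the decomposition: one enumerate pass collects the cut indices, then the result is built
-- from overlapping slices between consecutive cuts (objective: alternative; same O(n) cost).

-- ===== PORT A =====
-- loop body of A: state = (resultado, sublista); Python 'if sublista:' is 'sublista ≠ []'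
def dividirStepA (freg : String) (st : List (List String) × List String) (elemento : String) :
    List (List String) × List String :=
  if elemento = freg then
    if st.2 ≠ [] then (st.1 ++ [st.2 ++ [elemento]], [elemento])
    else (st.1, st.2 ++ [elemento])
  else (st.1, st.2 ++ [elemento])

def dividir_lista (lista : List String) (freg : String) : List (List String) :=
  let st := lista.foldl (dividirStepA freg) ([], [])
  if st.2 ≠ [] then st.1 ++ [st.2] else st.1

-- ===== PORT B =====
-- loop body of B: state = (res, start); res.append(lista[start:i+1]); start = i
def dividirStepB (lista : List String) (st : List (List String) × Int) (i : Int) :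
    List (List String) × Int :=
  (st.1 ++ [PySem.List.slice lista (some st.2) (some (i + 1))], i)

def dividir_lista_alt (lista : List String) (freg : String) : List (List String) :=
  let cuts : List Int :=
    (PySem.List.enumerate lista 0).filterMap
      (fun p => if p.2 = freg ∧ p.1 > 0 then some p.1 else none)
  let st := cuts.foldl (dividirStepB lista) ([], 0)
  let tail := PySem.List.slice lista (some st.2) none
  if tail ≠ [] then st.1 ++ [tail] else st.1

-- ===== PRECONDITION & SPEC =====
def Spec_dividir_lista (lista : List String) (freg : String) (out : List (List String)) : Prop := out = dividir_lista_alt lista freg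
instance (lista : List String) (freg : String) (out : List (List String)) : Decidable (Spec_dividir_lista lista freg out) := by unfold Spec_dividir_lista; infer_instance

-- ===== CLAIM (what is proved, stated in full; the proofs are below) =====
def Claim_equal_dividir_lista : Prop := ∀ (lista : List String) (freg : String), Dom_dividir_lista lista freg → Spec_dividir_lista lista freg (dividir_lista lista freg)

-- ===== LEMMAS AND PROOFS =====

-- positions s, s+1, … of freg inside a suffix of the list
def posFrom (freg : String) (s : Nat) : List String → List Nat
  | [] => []
  | y :: ys => if y = freg then s :: posFrom freg (s + 1) ys else posFrom freg (s + 1) ys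

-- B's slice-building phase, written over Nat cuts with take/drop
def brest (lista : List String) (s : Nat) : List Nat → List (List String)
  | [] => if lista.drop s ≠ [] then [lista.drop s] else []
  | c :: cs => ((lista.drop s).take (c + 1 - s)) :: brest lista c cs

-- A's grouping loop, recursively (acc is the current nonempty sublista)
def goA (freg : String) (acc : List String) : List String → List (List String)
  | [] => [acc]
  | y :: ys => if y = freg then (acc ++ [y]) :: goA freg [y] ys else goA freg (acc ++ [y]) ys

lemma foldA_eq_goA (freg : String) :
    ∀ (xs : List String) (res : List (List String)) (sub : List String), sub ≠ [] →
      (if (xs.foldl (dividirStepA freg) (res, sub)).2 ≠ [] then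
        (xs.foldl (dividirStepA freg) (res, sub)).1 ++ [(xs.foldl (dividirStepA freg) (res, sub)).2]
      else (xs.foldl (dividirStepA freg) (res, sub)).1) = res ++ goA freg sub xs := by
  intro xs
  induction xs with
  | nil => intro res sub h; simp [goA, h]
  | cons y ys ih =>
    intro res sub h
    by_cases hy : y = freg
    · have hstep : dividirStepA freg (res, sub) y = (res ++ [sub ++ [y]], [y]) := by
        simp [dividirStepA, hy, h]
      rw [List.foldl_cons, hstep, ih _ [y] (by simp)]
      simp [goA, hy]
    · have hstep : dividirStepA freg (res, sub) y = (res, sub ++ [y]) := by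
        simp [dividirStepA, hy]
      rw [List.foldl_cons, hstep, ih _ (sub ++ [y]) (by simp)]
      simp [goA, hy]

lemma filterMap_enumerate_eq_posFrom (freg : String) :
    ∀ (xs : List String) (s : Nat), 1 ≤ s →
      (PySem.List.enumerate xs ((s : Nat) : Int)).filterMap
          (fun p => if p.2 = freg ∧ p.1 > 0 then some p.1 else none)
        = (posFrom freg s xs).map (fun (c : Nat) => (c : Int)) := by
  intro xs
  induction xs with
  | nil => intro s _; simp [PySem.List.enumerate_nil, posFrom]
  | cons y ys ih =>
    intro s hs
    rw [PySem.List.enumerate_cons]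
    have hcast : ((s : Int) + 1) = (((s + 1 : Nat)) : Int) := by push_cast; ring
    rw [List.filterMap_cons, hcast, ih (s + 1) (by omega)]
    have hpos : 0 < s := hs
    by_cases hy : y = freg
    · simp [posFrom, hy, hpos]
    · simp [posFrom, hy]

lemma foldB_eq_brest (lista : List String) :
    ∀ (cs : List Nat) (s : Nat) (r0 : List (List String)),
      (if PySem.List.slice lista
            (some ((cs.map (fun (c : Nat) => (c : Int))).foldl (dividirStepB lista) (r0, (s : Int))).2) none ≠ [] then
        ((cs.map (fun (c : Nat) => (c : Int))).foldl (dividirStepB lista) (r0, (s : Int))).1 ++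
          [PySem.List.slice lista
            (some ((cs.map (fun (c : Nat) => (c : Int))).foldl (dividirStepB lista) (r0, (s : Int))).2) none]
      else ((cs.map (fun (c : Nat) => (c : Int))).foldl (dividirStepB lista) (r0, (s : Int))).1)
      = r0 ++ brest lista s cs := by
  intro cs
  induction cs with
  | nil =>
    intro s r0
    simp only [List.map_nil, List.foldl_nil, PySem.List.slice_from_natCast, brest]
    by_cases h : lista.drop s = [] <;> simp [h]
  | cons c cs ih =>
    intro s r0
    have hc : ((c : Int) + 1) = (((c + 1 : Nat)) : Int) := by push_cast; ring
    have hstep : dividirStepB lista (r0, (s : Int)) (c : Int)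
        = (r0 ++ [(lista.drop s).take (c + 1 - s)], (c : Int)) := by
      simp only [dividirStepB]
      rw [hc, PySem.List.slice_natCast]
    rw [List.map_cons, List.foldl_cons, hstep, ih c (r0 ++ [(lista.drop s).take (c + 1 - s)])]
    simp [brest]

lemma goA_eq_brest (freg : String) :
    ∀ (xs pre acc : List String) (s : Nat), acc ≠ [] → acc = pre.drop s →
      s + acc.length = pre.length →
      goA freg acc xs = brest (pre ++ xs) s (posFrom freg pre.length xs) := by
  intro xs
  induction xs with
  | nil =>
    intro pre acc s h hdrop hlen
    simp [goA, posFrom, brest, ← hdrop, h]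
  | cons y ys ih =>
    intro pre acc s h hdrop hlen
    have hsle : s ≤ pre.length := by omega
    have hdropa : (pre ++ y :: ys).drop s = acc ++ y :: ys := by
      rw [List.drop_append_of_le_length hsle, ← hdrop]
    by_cases hy : y = freg
    · subst hy
      simp only [goA, posFrom, brest, if_true]
      congr 1
      · have harith : pre.length + 1 - s = acc.length + 1 := by omega
        rw [hdropa, harith, List.take_append]
        simp
      · have := ih (pre ++ [y]) [y] pre.length (by simp) (by simp) (by simp)
        simpa [List.append_assoc] using this
    · simp only [goA, posFrom, if_neg hy]
      have := ih (pre ++ [y]) (acc ++ [y]) s (by simp)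
        (by rw [List.drop_append_of_le_length hsle, ← hdrop])
        (by simp; omega)
      simpa [List.append_assoc] using this

lemma dividir_nil (freg : String) : dividir_lista [] freg = dividir_lista_alt [] freg := by
  simp [dividir_lista, dividir_lista_alt, PySem.List.enumerate_nil, PySem.List.slice]

lemma dividir_cons (x : String) (xs : List String) (freg : String) :
    dividir_lista (x :: xs) freg = dividir_lista_alt (x :: xs) freg := by
  have hA : dividir_lista (x :: xs) freg = goA freg [x] xs := by
    have hstep : dividirStepA freg ([], []) x = ([], [x]) := by
      by_cases hx : x = freg <;> simp [dividirStepA, hx]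
    have h1 := foldA_eq_goA freg xs [] [x] (by simp)
    simp only [dividir_lista, List.foldl_cons, hstep]
    simpa using h1
  have hcuts : (PySem.List.enumerate (x :: xs) 0).filterMap
      (fun p => if p.2 = freg ∧ p.1 > 0 then some p.1 else none)
      = (posFrom freg 1 xs).map (fun (c : Nat) => (c : Int)) := by
    rw [PySem.List.enumerate_cons, List.filterMap_cons]
    have h1 : ((0 : Int) + 1) = (((1 : Nat)) : Int) := by norm_num
    rw [h1, filterMap_enumerate_eq_posFrom freg xs 1 (by omega)]
    simp
  have hB : dividir_lista_alt (x :: xs) freg = brest (x :: xs) 0 (posFrom freg 1 xs) := by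
    have h2 := foldB_eq_brest (x :: xs) (posFrom freg 1 xs) 0 []
    simp only [dividir_lista_alt, hcuts]
    simpa using h2
  rw [hA, hB]
  have := goA_eq_brest freg xs [x] [x] 0 (by simp) (by simp) (by simp)
  simpa using this

-- ===== VERDICT (by name: the statement is the Claim_ definition above) =====
theorem dividir_lista_spec : Claim_equal_dividir_lista := by
  intro lista freg _
  unfold Spec_dividir_lista
  cases lista with
  | nil => exact dividir_nil freg
  | cons x xs => exact dividir_cons x xs freg
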